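-- pv_equiv track=rewrite | github.com/snowink1137/TIL | 1.algorithm/temp/temp13.py | big
-- ===== SOURCE A (Python) =====
-- def big(s):
--     answer = len(s) - 1
--     while answer:
--         cnt = len(s) - answer
--         start = 0
--         end = answer
--         while cnt:
--             if s[start] != s[end]:
--                 return answer
--
--             start += 1
--             end += 1
--             cnt -= 1
--
--         answer -= 1
--
--     return answer
-- ===== SOURCE B (Python) =====
-- def big(s):
--     n = len(s)
--     best = 0
--     for a in range(1, n):
--         if s[a:] != s[:n - a]:
--             best = a
--     return best
-- ===== Notes on version B (the rewrite author's own statement) =====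
-- stated objective: alternative
-- what changed: A scans shifts downward with a hand-written two-pointer character loop and returns at the first mismatching shift; B makes one upward pass over all shifts comparing the suffix slice s[a:] with the prefix s[:n-a] (C-level slice comparison) and keeps the largest mismatching shift.
-- crash fix: A raises IndexError on the empty string (it indexes s[0] and s[-1] after answer starts at -1); B returns 0 there. — e.g. on big(""): A raises IndexError, B returns 0
import Mathlib
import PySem

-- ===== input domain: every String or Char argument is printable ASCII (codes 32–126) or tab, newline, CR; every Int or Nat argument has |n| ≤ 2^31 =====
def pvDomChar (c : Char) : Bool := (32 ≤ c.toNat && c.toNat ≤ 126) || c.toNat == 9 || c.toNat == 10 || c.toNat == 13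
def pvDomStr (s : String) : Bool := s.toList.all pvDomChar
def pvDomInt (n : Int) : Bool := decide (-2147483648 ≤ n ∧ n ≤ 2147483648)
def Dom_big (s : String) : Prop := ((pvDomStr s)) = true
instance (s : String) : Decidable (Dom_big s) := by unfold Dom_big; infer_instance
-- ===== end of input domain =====

-- B differs from A by traversal order and check: one upward pass keeping the largest
-- mismatching shift, with whole-slice comparison instead of A's two-pointer char loop.

-- ===== PORT A =====
-- inner 'while cnt' loop: compares s[start] with s[end] cnt times; indices are always
-- in range when big is called on a nonempty string, so getElem? is exact there.
def bigInner (cs : List Char) : Nat → Nat → Nat → Bool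
  | 0, _, _ => false
  | cnt+1, start, e => if cs[start]? != cs[e]? then true else bigInner cs cnt (start+1) (e+1)

-- outer 'while answer' loop, answer counting down; returning 'answer' at the first
-- mismatch is rendered as the if-branch on the Bool result of the inner loop.
def bigOuter (cs : List Char) : Nat → Int
  | 0 => 0
  | a+1 => if bigInner cs (cs.length - (a+1)) 0 (a+1) then ((a : Int)+1) else bigOuter cs a

def big (s : String) : Int := bigOuter s.toList (s.toList.length - 1)

-- ===== PORT B =====
def big_alt (s : String) : Int :=
  let cs := s.toList
  let n : Int := cs.length
  (PySem.List.pyRange 1 n 1).foldl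
    (fun best a =>
      if PySem.List.slice cs (some a) none ≠ PySem.List.slice cs none (some (n - a)) then a
      else best) 0

-- ===== PRECONDITION & SPEC =====
-- Pre_ excludes only the empty string, on which Python A raises IndexError.
def Pre_big (s : String) : Prop := s ≠ ""
instance (s : String) : Decidable (Pre_big s) := by unfold Pre_big; infer_instance
def pvWitness_big : String := "ab"

-- A raises IndexError on the empty string; B returns 0 there.
def Raises_big (s : String) : Prop := s = ""
instance (s : String) : Decidable (Raises_big s) := by unfold Raises_big; infer_instance
def pvRaiseWitness_big : String := ""
def pvRaiseWitnessOut_big : Int := 0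

def Spec_big (s : String) (out : Int) : Prop := out = big_alt s
instance (s : String) (out : Int) : Decidable (Spec_big s out) := by unfold Spec_big; infer_instance

-- ===== CLAIM (what is proved, stated in full; the proofs are below) =====
def Claim_equal_big : Prop := ∀ (s : String), Dom_big s → Pre_big s → Spec_big s (big s)
def Claim_raises_big : Prop := (∀ (s : String), Dom_big s → Raises_big s → ¬ Pre_big s) ∧ (Dom_big (pvRaiseWitness_big) ∧ Raises_big (pvRaiseWitness_big) ∧ big_alt (pvRaiseWitness_big) = pvRaiseWitnessOut_big)

-- ===== LEMMAS AND PROOFS =====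

lemma bigInner_iff (cs : List Char) : ∀ (cnt start e : Nat),
    bigInner cs cnt start e = true ↔ ∃ k < cnt, cs[start+k]? ≠ cs[e+k]? := by
  intro cnt
  induction cnt with
  | zero => intro start e; simp [bigInner]
  | succ m ih =>
    intro start e
    simp only [bigInner]
    by_cases h : cs[start]? = cs[e]?
    · rw [if_neg (by simp [h]), ih]
      constructor
      · rintro ⟨k, hk, hne⟩
        refine ⟨k+1, by omega, ?_⟩
        simpa [Nat.add_comm, Nat.add_assoc, Nat.add_left_comm] using hne
      · rintro ⟨k, hk, hne⟩
        match k with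
        | 0 => exact absurd h (by simpa using hne)
        | j+1 =>
          refine ⟨j, by omega, ?_⟩
          simpa [Nat.add_comm, Nat.add_assoc, Nat.add_left_comm] using hne
    · rw [if_pos (by simpa using h)]
      exact ⟨fun _ => ⟨0, by omega, by simpa using h⟩, fun _ => rfl⟩

lemma mismatch_iff (cs : List Char) (a : Nat) (ha : a ≤ cs.length) :
    bigInner cs (cs.length - a) 0 a = true ↔ cs.drop a ≠ cs.take (cs.length - a) := by
  rw [bigInner_iff]
  constructor
  · rintro ⟨k, hk, hne⟩ heq
    apply hne
    have h1 : (cs.drop a)[k]? = cs[a+k]? := by rw [List.getElem?_drop]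
    have h2 : (cs.take (cs.length - a))[k]? = cs[k]? := by
      rw [List.getElem?_take_of_lt hk]
    rw [heq, h2] at h1
    simpa using h1
  · intro hne
    by_contra hall
    push_neg at hall
    apply hne
    apply List.ext_getElem?
    intro k
    rw [List.getElem?_drop]
    by_cases hk : k < cs.length - a
    · have := hall k hk
      rw [List.getElem?_take_of_lt hk]
      simpa using this.symm
    · have h1 : cs[a+k]? = none := List.getElem?_eq_none (by omega)
      have h2 : (cs.take (cs.length - a))[k]? = none :=
        List.getElem?_eq_none (by simp; omega)
      rw [h1, h2]

lemma foldl_eq_outer (cs : List Char) (f : Int → Int → Int)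
    (hf : ∀ best (a : Nat), 1 ≤ a → a < cs.length →
      f best (a : Int) = if bigInner cs (cs.length - a) 0 a then (a : Int) else best) :
    ∀ m : Nat, m ≤ cs.length →
      (PySem.List.pyRange 1 (m : Int) 1).foldl f 0 = bigOuter cs (m - 1) := by
  intro m
  induction m with
  | zero => intro _; simp [PySem.List.pyRange_one_eq_nil (by omega : (0:Int) ≤ 1), bigOuter]
  | succ j ih =>
    intro hle
    by_cases hj : j = 0
    · subst hj
      simp [PySem.List.pyRange_one_eq_nil (by omega : (1:Int) ≤ 1), bigOuter]
    · obtain ⟨i, rfl⟩ : ∃ i, j = i + 1 := ⟨j - 1, by omega⟩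
      have h1 : ((i + 1 + 1 : Nat) : Int) = ((i + 1 : Nat) : Int) + 1 := by push_cast; ring
      rw [h1, PySem.List.pyRange_one_succ_right (by push_cast; omega), List.foldl_append]
      simp only [List.foldl]
      rw [hf _ (i + 1) (by omega) (by omega), ih (by omega)]
      show _ = bigOuter cs (i + 1)
      simp only [bigOuter, Nat.succ_sub_one]
      split_ifs
      · push_cast; ring
      · rfl

theorem big_spec : Claim_equal_big := by
  intro s _ _
  unfold Spec_big big big_alt
  show bigOuter s.toList (s.toList.length - 1) = _
  have hf : ∀ best (a : Nat), 1 ≤ a → a < s.toList.length →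
      (if PySem.List.slice s.toList (some (a : Int)) none ≠
          PySem.List.slice s.toList none (some ((s.toList.length : Int) - (a : Int))) then (a : Int)
       else best)
      = if bigInner s.toList (s.toList.length - a) 0 a then (a : Int) else best := by
    intro best a ha hlt
    have hcast : ((s.toList.length : Int) - (a : Int)) = ((s.toList.length - a : Nat) : Int) := by
      push_cast [Nat.cast_sub (le_of_lt hlt)]; ring
    rw [PySem.List.slice_from_natCast, hcast, PySem.List.slice_to_natCast]
    have hm := mismatch_iff s.toList a (le_of_lt hlt)
    by_cases hd : s.toList.drop a = s.toList.take (s.toList.length - a)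
    · rw [if_neg (by simpa using hd), if_neg (fun h => (hm.mp h) hd)]
    · rw [if_pos hd, if_pos (hm.mpr hd)]
  exact (foldl_eq_outer s.toList _ hf s.toList.length le_rfl).symm

theorem big_raises : Claim_raises_big := by
  unfold Claim_raises_big
  exact ⟨by intro s _ h hp; exact hp h, by decide⟩

-- self-check that the crash-fix witness value really is B's output there
theorem big_raises_ok : big_alt pvRaiseWitness_big = pvRaiseWitnessOut_big :=
  big_raises.2.2.2
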